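-- pv_equiv track=rewrite | github.com/raddanfea/python2020 | pythonProject/7/jelmondat.py | occurs
-- ===== SOURCE A (Python) =====
-- def occurs(words):
--     d = {}
--
--     for word in words.split():
--         if word not in d:
--             d[word] = 1
--         else:
--             return False
--
--     return True
-- ===== SOURCE B (Python) =====
-- def occurs(words):
--     ws = sorted(words.split())
--     return all(a != b for a, b in zip(ws, ws[1:]))
-- ===== Notes on version B (the rewrite author's own statement) =====
-- stated objective: alternative
-- what changed: Replaces A's hash-dict membership scan with early exit by sorting the word list and checking that no two adjacent words in the sorted list are equal (no hashing, no early exit).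
import Mathlib
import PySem

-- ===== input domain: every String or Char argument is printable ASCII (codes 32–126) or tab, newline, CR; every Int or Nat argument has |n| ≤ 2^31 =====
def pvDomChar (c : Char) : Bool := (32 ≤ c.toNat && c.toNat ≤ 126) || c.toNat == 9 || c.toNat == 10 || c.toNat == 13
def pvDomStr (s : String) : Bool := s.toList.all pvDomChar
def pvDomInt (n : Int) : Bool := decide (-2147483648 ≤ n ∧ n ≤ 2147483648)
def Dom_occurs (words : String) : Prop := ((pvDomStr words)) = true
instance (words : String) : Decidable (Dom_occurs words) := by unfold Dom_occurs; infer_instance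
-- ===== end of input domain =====

-- B replaces A's dict-membership loop with a sort-then-adjacent-comparison scan
-- (alternative algorithm: comparison-based, no hashing, no early exit).


-- ===== PORT A =====
-- the for-loop over words.split() with the early 'return False'
def occursLoop (d : PySem.Dict String Int) : List String → Bool
  | [] => true
  | w :: ws =>
    if d.contains w = false then occursLoop (d.insert w 1) ws
    else false

def occurs (words : String) : Bool :=
  occursLoop PySem.Dict.empty (PySem.Str.split₀ words)

-- ===== PORT B =====
-- sorted(words.split()), then all(a != b for a, b in zip(ws, ws[1:]))
def occurs_alt (words : String) : Bool :=
  let ws := PySem.List.sorted (PySem.Str.split₀ words) (fun x => x) false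
  (ws.zip ws.tail).all (fun p => p.1 != p.2)

-- ===== PRECONDITION & SPEC =====
def Spec_occurs (words : String) (out : Bool) : Prop := out = occurs_alt words
instance (words : String) (out : Bool) : Decidable (Spec_occurs words out) := by unfold Spec_occurs; infer_instance

-- ===== CLAIM (what is proved, stated in full; the proofs are below) =====
def Claim_equal_occurs : Prop := ∀ (words : String), Dom_occurs words → Spec_occurs words (occurs words)

-- ===== LEMMAS AND PROOFS =====

-- A's loop returns true iff no word is already a key and the remaining words are distinct
theorem occursLoop_eq (ws : List String) (d : PySem.Dict String Int) :
    occursLoop d ws = true ↔ (∀ w ∈ ws, d.contains w = false) ∧ ws.Nodup := by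
  induction ws generalizing d with
  | nil => simp [occursLoop]
  | cons w ws ih =>
    simp only [occursLoop]
    by_cases h : d.contains w = false
    · rw [if_pos h, ih]
      simp only [List.forall_mem_cons, List.nodup_cons, PySem.Dict.contains_insert,
        Bool.or_eq_false_iff, beq_eq_false_iff_ne]
      constructor
      · rintro ⟨h1, h2⟩
        exact ⟨⟨h, fun x hx => (h1 x hx).2⟩, fun hw => (h1 w hw).1 rfl, h2⟩
      · rintro ⟨⟨_, h1⟩, hw, h2⟩
        exact ⟨fun x hx => ⟨fun e => hw (e ▸ hx), h1 x hx⟩, h2⟩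
    · rw [if_neg h]
      simp only [Bool.not_eq_false] at h
      constructor
      · intro hfalse; cases hfalse
      · rintro ⟨h1, _⟩
        rw [h1 w List.mem_cons_self] at h
        cases h

-- the zip-with-tail all-distinct test is IsChain (· ≠ ·)
theorem zip_tail_all_ne {α : Type} [DecidableEq α] (l : List α) :
    ((l.zip l.tail).all (fun p => p.1 != p.2)) = true ↔ l.IsChain (· ≠ ·) := by
  induction l with
  | nil => simp
  | cons a l ih =>
    cases l with
    | nil => simp
    | cons b l =>
      simp only [List.tail_cons, List.zip_cons_cons, List.all_cons, Bool.and_eq_true,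
        bne_iff_ne, List.isChain_cons_cons] at *
      exact and_congr Iff.rfl ih

-- on a ≤-sorted list, adjacent distinctness is exactly Nodup
theorem isChain_ne_iff_nodup_of_sorted {α : Type} [LinearOrder α] (l : List α)
    (hs : l.Pairwise (· ≤ ·)) : l.IsChain (· ≠ ·) ↔ l.Nodup := by
  constructor
  · intro hc
    have hlt : l.IsChain (· < ·) := by
      have hle : l.IsChain (· ≤ ·) := List.isChain_iff_pairwise.mpr hs
      clear hs
      induction l with
      | nil => exact List.isChain_nil
      | cons a l ih =>
        cases l with
        | nil => simp
        | cons b l =>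
          rw [List.isChain_cons_cons] at hc hle ⊢
          exact ⟨lt_of_le_of_ne hle.1 hc.1, ih hc.2 hle.2⟩
    exact ((List.isChain_iff_pairwise).mp hlt).imp ne_of_lt
  · intro hn
    exact List.Pairwise.isChain hn

-- ===== VERDICT (by name: the statement is the Claim_ definition above) =====
theorem occurs_spec : Claim_equal_occurs := by
  intro words _
  unfold Spec_occurs occurs occurs_alt
  set ws := PySem.Str.split₀ words with hws
  set ss := PySem.List.sorted ws (fun x => x) false with hss
  have hperm : ss.Perm ws := PySem.List.sorted_perm ws (fun x => x) false
  have hpw : ss.Pairwise (· ≤ ·) := PySem.List.sorted_pairwise ws (fun x => x)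
  show occursLoop PySem.Dict.empty ws = (ss.zip ss.tail).all (fun p => p.1 != p.2)
  by_cases hnd : ws.Nodup
  · have h1 : occursLoop PySem.Dict.empty ws = true :=
      (occursLoop_eq ws _).mpr ⟨fun w _ => by simp, hnd⟩
    have h2 : ((ss.zip ss.tail).all (fun p => p.1 != p.2)) = true :=
      (zip_tail_all_ne ss).mpr
        ((isChain_ne_iff_nodup_of_sorted ss hpw).mpr (hperm.nodup_iff.mpr hnd))
    rw [h1, h2]
  · have h1 : occursLoop PySem.Dict.empty ws ≠ true := fun hc =>
      hnd ((occursLoop_eq ws _).mp hc).2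
    have h2 : ((ss.zip ss.tail).all (fun p => p.1 != p.2)) ≠ true := fun hc =>
      hnd (hperm.nodup_iff.mp
        ((isChain_ne_iff_nodup_of_sorted ss hpw).mp ((zip_tail_all_ne ss).mp hc)))
    simp only [Bool.not_eq_true] at h1 h2
    rw [h1, h2]
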